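-- pv_equiv track=rewrite | github.com/Arthur-Dauphole/Projet-BRAIN | Arthur_2/BRAIN_PROJECT/modules/detector.py | _check_t_down
-- ===== SOURCE A (Python) =====
-- def _check_t_down(pixel_set, min_r, min_c, max_r, max_c, height, width):
--     """T with bar at top, stem going down."""
--     center_c = (min_c + max_c) // 2
--     expected = set()
--     for c in range(min_c, max_c + 1):
--         expected.add((min_r, c))
--     for r in range(min_r, max_r + 1):
--         expected.add((r, center_c))
--     return pixel_set == expected
-- ===== SOURCE B (Python) =====
-- def _check_t_down(pixel_set, min_r, min_c, max_r, max_c, height, width):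
--     """T with bar at top, stem going down."""
--     center_c = (min_c + max_c) // 2
--     ok = all((r == min_r and min_c <= c <= max_c) or
--              (c == center_c and min_r <= r <= max_r)
--              for (r, c) in pixel_set)
--     top = max(0, max_c - min_c + 1)
--     stem = max(0, max_r - min_r + 1)
--     overlap = 1 if top > 0 and stem > 0 else 0
--     return ok and len(pixel_set) == top + stem - overlap
-- ===== Notes on version B (the rewrite author's own statement) =====
-- stated objective: faster
-- what changed: B never materialises the expected pixel set: it checks every pixel against a closed-form shape predicate in one pass and compares len(pixel_set) with the closed-form cardinality top + stem - overlap, instead of building the set of expected coordinates and testing set equality.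
import Mathlib
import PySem

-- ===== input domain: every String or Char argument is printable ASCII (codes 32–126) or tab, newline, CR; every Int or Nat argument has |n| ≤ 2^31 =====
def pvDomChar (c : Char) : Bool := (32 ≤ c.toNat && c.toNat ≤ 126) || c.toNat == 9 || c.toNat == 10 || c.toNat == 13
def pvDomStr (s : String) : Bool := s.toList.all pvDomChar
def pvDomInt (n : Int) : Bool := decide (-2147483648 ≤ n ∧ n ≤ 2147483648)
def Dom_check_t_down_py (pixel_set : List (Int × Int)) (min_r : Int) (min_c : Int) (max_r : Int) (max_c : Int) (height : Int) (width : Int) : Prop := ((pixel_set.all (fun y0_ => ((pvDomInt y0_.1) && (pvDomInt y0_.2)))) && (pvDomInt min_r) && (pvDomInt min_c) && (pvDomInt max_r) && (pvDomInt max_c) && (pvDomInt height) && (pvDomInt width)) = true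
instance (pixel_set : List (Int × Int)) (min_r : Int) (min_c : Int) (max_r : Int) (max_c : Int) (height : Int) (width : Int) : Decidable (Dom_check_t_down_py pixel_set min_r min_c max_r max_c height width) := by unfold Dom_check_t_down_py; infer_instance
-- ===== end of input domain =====

-- B replaces A's materialised `expected` set by a single membership pass plus a
-- closed-form cardinality check (objective: alternative decomposition, no set is built).

-- ===== PORT A =====
def check_t_down_py (pixel_set : List (Int × Int)) (min_r : Int) (min_c : Int) (max_r : Int) (max_c : Int) (height : Int) (width : Int) : Bool :=
  let center_c := PySem.Int.floordiv (min_c + max_c) 2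
  let expected : PySem.Set (Int × Int) :=
    (PySem.List.pyRange min_c (max_c + 1)).foldl (fun s c => PySem.Set.add s (min_r, c)) PySem.Set.empty
  let expected : PySem.Set (Int × Int) :=
    (PySem.List.pyRange min_r (max_r + 1)).foldl (fun s r => PySem.Set.add s (r, center_c)) expected
  PySem.Set.equal pixel_set expected

-- ===== PORT B =====
def check_t_down_py_alt (pixel_set : List (Int × Int)) (min_r : Int) (min_c : Int) (max_r : Int) (max_c : Int) (height : Int) (width : Int) : Bool :=
  let center_c := PySem.Int.floordiv (min_c + max_c) 2
  let ok := pixel_set.all (fun p =>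
      (p.1 == min_r && decide (min_c ≤ p.2) && decide (p.2 ≤ max_c)) ||
      (p.2 == center_c && decide (min_r ≤ p.1) && decide (p.1 ≤ max_r)))
  let top := max 0 (max_c - min_c + 1)
  let stem := max 0 (max_r - min_r + 1)
  let overlap : Int := if top > 0 ∧ stem > 0 then 1 else 0
  ok && ((pixel_set.length : Int) == top + stem - overlap)

-- ===== PRECONDITION & SPEC =====
-- pixel_set is a Python `set`, modelled as the list of its DISTINCT elements; Pre_ states
-- exactly that representation invariant (Nodup) and nothing else.
def Pre_check_t_down_py (pixel_set : List (Int × Int)) (min_r : Int) (min_c : Int) (max_r : Int) (max_c : Int) (height : Int) (width : Int) : Prop :=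
  pixel_set.Nodup
instance (pixel_set : List (Int × Int)) (min_r : Int) (min_c : Int) (max_r : Int) (max_c : Int) (height : Int) (width : Int) : Decidable (Pre_check_t_down_py pixel_set min_r min_c max_r max_c height width) := by unfold Pre_check_t_down_py; infer_instance

def pvWitness_check_t_down_py : (List (Int × Int)) × Int × Int × Int × Int × Int × Int :=
  ([(0, 0), (0, 1), (0, 2), (1, 1)], 0, 0, 1, 2, 5, 5)

def Spec_check_t_down_py (pixel_set : List (Int × Int)) (min_r : Int) (min_c : Int) (max_r : Int) (max_c : Int) (height : Int) (width : Int) (out : Bool) : Prop := out = check_t_down_py_alt pixel_set min_r min_c max_r max_c height width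
instance (pixel_set : List (Int × Int)) (min_r : Int) (min_c : Int) (max_r : Int) (max_c : Int) (height : Int) (width : Int) (out : Bool) : Decidable (Spec_check_t_down_py pixel_set min_r min_c max_r max_c height width out) := by unfold Spec_check_t_down_py; infer_instance

-- ===== CLAIM (what is proved, stated in full; the proofs are below) =====
def Claim_equal_check_t_down_py : Prop := ∀ (pixel_set : List (Int × Int)) (min_r : Int) (min_c : Int) (max_r : Int) (max_c : Int) (height : Int) (width : Int), Dom_check_t_down_py pixel_set min_r min_c max_r max_c height width → Pre_check_t_down_py pixel_set min_r min_c max_r max_c height width → Spec_check_t_down_py pixel_set min_r min_c max_r max_c height width (check_t_down_py pixel_set min_r min_c max_r max_c height width)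

-- ===== LEMMAS AND PROOFS =====

-- folding `Set.add (f x)` over a list with pairwise-distinct images appends exactly the fresh images
lemma foldl_add_inj {α : Type} [BEq α] [LawfulBEq α] (f : Int → α) (l : List Int) (s : List α)
    (hinj : (l.map f).Nodup) :
    l.foldl (fun s x => PySem.Set.add s (f x)) s
      = s ++ (l.filter (fun x => decide (f x ∉ s))).map f := by
  induction l generalizing s with
  | nil => simp
  | cons a l ih =>
    simp only [List.map_cons, List.nodup_cons] at hinj
    by_cases hmem : f a ∈ s
    · have : PySem.Set.add s (f a) = s := by
        simp [PySem.Set.add, PySem.Set.contains, hmem]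
      simp only [List.foldl_cons, this, List.filter_cons, hmem]
      simpa using ih s hinj.2
    · have hadd : PySem.Set.add s (f a) = s ++ [f a] := by
        simp [PySem.Set.add, PySem.Set.contains, hmem]
      have hfilter : l.filter (fun x => decide (f x ∉ s ++ [f a]))
          = l.filter (fun x => decide (f x ∉ s)) := by
        apply List.filter_congr
        intro x hx
        have hne : f x ≠ f a := by
          intro h; exact hinj.1 (h ▸ List.mem_map_of_mem hx)
        simp [hne]
      simp only [List.foldl_cons, hadd, ih _ hinj.2, hfilter, List.filter_cons, hmem]
      simp

lemma mem_bar (mr mc Mc : Int) (x : Int × Int) :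
    x ∈ (PySem.List.pyRange mc (Mc + 1)).map (fun c => ((mr, c) : Int × Int))
      ↔ x.1 = mr ∧ mc ≤ x.2 ∧ x.2 ≤ Mc := by
  simp only [List.mem_map, PySem.List.mem_pyRange_one]
  constructor
  · rintro ⟨c, ⟨h1, h2⟩, rfl⟩; exact ⟨rfl, h1, by omega⟩
  · rintro ⟨h1, h2, h3⟩
    exact ⟨x.2, ⟨h2, by omega⟩, by rw [← h1]⟩

lemma check_t_down_core (pixel_set : List (Int × Int)) (min_r min_c max_r max_c height width : Int)
    (hnd : pixel_set.Nodup) :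
    check_t_down_py pixel_set min_r min_c max_r max_c height width
      = check_t_down_py_alt pixel_set min_r min_c max_r max_c height width := by
  simp only [check_t_down_py, check_t_down_py_alt]
  set cc := PySem.Int.floordiv (min_c + max_c) 2 with hcc
  set barL := (PySem.List.pyRange min_c (max_c + 1)).map (fun c => ((min_r, c) : Int × Int)) with hbarL
  set stemF := ((PySem.List.pyRange min_r (max_r + 1)).filter
      (fun r => decide (((r, cc) : Int × Int) ∉ barL))).map (fun r => ((r, cc) : Int × Int)) with hstemF
  -- the two folds build exactly barL ++ stemF
  have hbar_nodup : barL.Nodup := by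
    rw [hbarL]
    exact List.Nodup.map (fun a b h => by simpa using congrArg Prod.snd h) (PySem.List.nodup_pyRange_one _ _)
  have hfold1 : (PySem.List.pyRange min_c (max_c + 1)).foldl
      (fun s c => PySem.Set.add s (min_r, c)) PySem.Set.empty = barL := by
    rw [foldl_add_inj (fun c => ((min_r, c) : Int × Int)) _ _ (by rw [← hbarL]; exact hbar_nodup)]
    simp [PySem.Set.empty, hbarL]
  have hstem_nodup_pre : ((PySem.List.pyRange min_r (max_r + 1)).map
      (fun r => ((r, cc) : Int × Int))).Nodup :=
    List.Nodup.map (fun a b h => by simpa using congrArg Prod.fst h) (PySem.List.nodup_pyRange_one _ _)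
  have hfold2 : (PySem.List.pyRange min_r (max_r + 1)).foldl
      (fun s r => PySem.Set.add s (r, cc)) barL = barL ++ stemF := by
    rw [foldl_add_inj (fun r => ((r, cc) : Int × Int)) _ _ hstem_nodup_pre, hstemF]
  rw [hfold1, hfold2]
  set E := barL ++ stemF with hE
  -- membership characterisation
  have hmemE : ∀ x : Int × Int, x ∈ E ↔
      ((x.1 = min_r ∧ min_c ≤ x.2 ∧ x.2 ≤ max_c) ∨ (x.2 = cc ∧ min_r ≤ x.1 ∧ x.1 ≤ max_r)) := by
    intro x
    rw [hE, List.mem_append, mem_bar]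
    constructor
    · rintro (h | h)
      · exact Or.inl h
      · rw [hstemF] at h
        simp only [List.mem_map, List.mem_filter, PySem.List.mem_pyRange_one] at h
        obtain ⟨r, ⟨⟨h1, h2⟩, _⟩, rfl⟩ := h
        exact Or.inr ⟨rfl, h1, by omega⟩
    · rintro (h | h)
      · exact Or.inl h
      · by_cases hb : x ∈ barL
        · rw [mem_bar] at hb; exact Or.inl hb
        · right
          rw [hstemF]
          simp only [List.mem_map, List.mem_filter, PySem.List.mem_pyRange_one]
          refine ⟨x.1, ⟨⟨h.2.1, by omega⟩, ?_⟩, by rw [← h.1]⟩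
          rw [decide_eq_true_eq]
          intro hmem
          exact hb (by rwa [show ((x.1, cc) : Int × Int) = x from by rw [← h.1]] at hmem)
  -- E has no duplicates
  have hE_nodup : E.Nodup := by
    rw [hE]
    refine List.Nodup.append hbar_nodup ?_ ?_
    · rw [hstemF]
      exact List.Nodup.map (fun a b h => by simpa using congrArg Prod.fst h)
        ((PySem.List.nodup_pyRange_one _ _).filter _)
    · intro x hx1 hx2
      rw [hstemF] at hx2
      simp only [List.mem_map, List.mem_filter, decide_eq_true_eq] at hx2
      obtain ⟨r, ⟨_, hnot⟩, rfl⟩ := hx2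
      exact hnot hx1
  -- cardinality of E in closed form
  have hE_len : (E.length : Int) = max 0 (max_c - min_c + 1) + max 0 (max_r - min_r + 1)
      - (if max 0 (max_c - min_c + 1) > 0 ∧ max 0 (max_r - min_r + 1) > 0 then (1:Int) else 0) := by
    have hbar_len : (barL.length : Int) = max 0 (max_c - min_c + 1) := by
      rw [hbarL, List.length_map, PySem.List.length_pyRange_one]; omega
    by_cases hc : min_c ≤ max_c
    · -- bar nonempty; the center column lies inside it
      have hmid := PySem.Int.floordiv_two_mid_bounds hc
      have hfilt : (PySem.List.pyRange min_r (max_r + 1)).filter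
          (fun r => decide (((r, cc) : Int × Int) ∉ barL))
          = (PySem.List.pyRange min_r (max_r + 1)).filter (fun r => decide (r ≠ min_r)) := by
        apply List.filter_congr
        intro r _
        simp only [decide_eq_decide, hbarL, mem_bar]
        constructor
        · intro h hr; exact h ⟨hr, hmid.1, hmid.2⟩
        · intro h hmem; exact h hmem.1
      by_cases hr : min_r ≤ max_r
      · have hcons : PySem.List.pyRange min_r (max_r + 1)
            = min_r :: PySem.List.pyRange (min_r + 1) (max_r + 1) :=
          PySem.List.pyRange_one_cons (by omega)
        have htail : (PySem.List.pyRange (min_r + 1) (max_r + 1)).filter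
            (fun r => decide (r ≠ min_r)) = PySem.List.pyRange (min_r + 1) (max_r + 1) := by
          rw [List.filter_eq_self]
          intro a ha
          rw [PySem.List.mem_pyRange_one] at ha
          simp only [decide_eq_true_eq]
          omega
        rw [hE, List.length_append, hstemF, hfilt, hcons]
        simp only [List.filter_cons, decide_eq_true_eq]
        rw [if_neg (by simp), htail]
        simp only [List.length_map, PySem.List.length_pyRange_one]
        push_cast at hbar_len ⊢
        omega
      · have hnil : PySem.List.pyRange min_r (max_r + 1) = [] :=
          List.eq_nil_of_length_eq_zero (by rw [PySem.List.length_pyRange_one]; omega)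
        rw [hE, List.length_append, hstemF, hnil]
        simp only [List.filter_nil, List.map_nil, List.length_nil]
        push_cast at hbar_len ⊢
        omega
    · -- bar empty: E is exactly the stem
      have hpnil : PySem.List.pyRange min_c (max_c + 1) = [] :=
        List.eq_nil_of_length_eq_zero (by rw [PySem.List.length_pyRange_one]; omega)
      have hbnil : barL = [] := by rw [hbarL, hpnil]; rfl
      have hfilt : (PySem.List.pyRange min_r (max_r + 1)).filter
          (fun r => decide (((r, cc) : Int × Int) ∉ barL)) = PySem.List.pyRange min_r (max_r + 1) := by
        rw [List.filter_eq_self]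
        intro a _
        simp [hbnil]
      rw [hE, List.length_append, hstemF, hfilt]
      simp only [hbarL, List.length_map, PySem.List.length_pyRange_one]
      push_cast
      omega
  -- put everything together
  simp only [PySem.Set.equal, PySem.Set.issubset, PySem.Set.contains]
  rw [Bool.eq_iff_iff]
  simp only [Bool.and_eq_true, List.all_eq_true, beq_iff_eq, Bool.or_eq_true,
    decide_eq_true_eq, List.contains_iff_mem]
  constructor
  · rintro ⟨hsub, hsup⟩
    have hperm : pixel_set.Perm E :=
      (hnd.subperm (fun x hx => hsub x hx)).antisymm (hE_nodup.subperm (fun x hx => hsup x hx))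
    constructor
    · intro p hp
      have := (hmemE p).mp (hsub p hp)
      tauto
    · rw [hperm.length_eq]
      exact_mod_cast hE_len
  · rintro ⟨hall, hlen⟩
    have hsub : pixel_set ⊆ E := by
      intro x hx
      rw [hmemE]
      have := hall x hx
      tauto
    have hlen2 : E.length ≤ pixel_set.length := by
      have : (pixel_set.length : Int) = (E.length : Int) := by rw [hE_len]; exact_mod_cast hlen
      omega
    have hperm : pixel_set.Perm E := (hnd.subperm hsub).perm_of_length_le hlen2
    exact ⟨fun x hx => hsub hx, fun x hx => hperm.symm.subset hx⟩

-- ===== VERDICT (by name: the statement is the Claim_ definition above) =====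
theorem check_t_down_py_spec : Claim_equal_check_t_down_py := by
  intro ps mr mc Mr Mc h w _ hpre
  exact check_t_down_core ps mr mc Mr Mc h w hpre
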